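-- pv_equiv track=rewrite | github.com/yoonkim/neural-qcfg | utils.py | extract_dag
-- ===== SOURCE A (Python) =====
-- def covered(l, r, spans):
--   for span in spans:
--     if span[0] <= l and span[1] >= r:
--       return True
--   return False
--
-- def extract_dag(spans, length):
--   nodes = list(range(len(spans)))
--   adj = []
--   spans.sort(key = lambda x: x[1]-x[0])
--   for i, (node, span) in enumerate(zip(nodes, spans)):
--     l, r, t = span
--     if r-l > 0:
--       covered_spans = []
--       for k in reversed(range(i)):
--         l2, r2, t2 = spans[k]
--         if l2 >= l and r2 <= r and not covered(l2, r2, covered_spans):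
--           adj.append((node, nodes[k]))
--           covered_spans.append([l2, r2])
--   return nodes, adj
-- ===== SOURCE B (Python) =====
-- def extract_dag(spans, length):
--     spans.sort(key=lambda x: x[1] - x[0])
--     nodes = list(range(len(spans)))
--     adj = []
--     for i, (l, r, _t) in enumerate(spans):
--         if r - l > 0:
--             for k in reversed(range(i)):
--                 l2, r2, _t2 = spans[k]
--                 if l <= l2 and r2 <= r and not any(
--                         l <= spans[j][0] <= l2 and r2 <= spans[j][1] <= r
--                         for j in range(k + 1, i)):
--                     adj.append((i, k))
--     return nodes, adj
-- ===== Notes on version B (the rewrite author's own statement) =====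
-- stated objective: simpler
-- what changed: B drops A's helper covered() and the per-i stateful covered_spans accumulator: a candidate k is an edge iff no candidate j strictly between k and i contains it, a stateless test justified by transitivity of span containment.
import Mathlib
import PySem

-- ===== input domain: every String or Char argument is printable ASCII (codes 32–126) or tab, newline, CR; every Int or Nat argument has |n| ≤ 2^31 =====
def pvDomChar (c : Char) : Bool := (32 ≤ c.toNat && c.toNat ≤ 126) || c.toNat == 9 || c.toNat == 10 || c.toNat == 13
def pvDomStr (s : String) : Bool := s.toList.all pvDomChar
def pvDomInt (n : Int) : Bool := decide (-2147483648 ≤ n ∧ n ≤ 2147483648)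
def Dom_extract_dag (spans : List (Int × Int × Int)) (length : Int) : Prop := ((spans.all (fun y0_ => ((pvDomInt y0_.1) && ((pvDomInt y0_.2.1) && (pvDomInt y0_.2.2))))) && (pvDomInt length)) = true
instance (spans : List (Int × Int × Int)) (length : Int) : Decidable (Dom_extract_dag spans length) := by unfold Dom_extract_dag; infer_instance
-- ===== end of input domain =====

-- B replaces A's stateful covered_spans accumulator and helper covered() by a stateless maximality
-- test (candidate k is an edge iff no candidate j between k and i contains it); equivalence is about
-- the RETURN value only — both Pythons sort `spans` in place identically.

-- ===== PORT A =====
def covered (l r : Int) (spans : List (Int × Int)) : Bool :=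
  spans.any (fun span => decide (span.1 ≤ l) && decide (span.2 ≥ r))

def extract_dag (spans : List (Int × Int × Int)) (length : Int) : List Int × (List (Int × Int)) :=
  let nodes : List Int := PySem.List.pyRange 0 (spans.length : Int) 1
  let spans2 := PySem.List.sorted spans (fun x => x.2.1 - x.1)
  let adj : List (Int × Int) :=
    (PySem.List.enumerate (nodes.zip spans2)).foldl (fun adj p =>
      let node := p.2.1
      let l := p.2.2.1
      let r := p.2.2.2.1
      if r - l > 0 then
        ((PySem.List.pyRange 0 p.1 1).reverse.foldl
          (fun (st : List (Int × Int) × List (Int × Int)) k =>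
            let sp := PySem.List.pyGetD spans2 k (0, 0, 0)
            if sp.1 ≥ l ∧ sp.2.1 ≤ r ∧ ¬ covered sp.1 sp.2.1 st.2 = true then
              (st.1 ++ [(node, PySem.List.pyGetD nodes k 0)], st.2 ++ [(sp.1, sp.2.1)])
            else st) ((adj, ([] : List (Int × Int))))).1
      else adj) []
  (nodes, adj)

-- ===== PORT B =====
def extract_dag_alt (spans : List (Int × Int × Int)) (length : Int) : List Int × (List (Int × Int)) :=
  let spans2 := PySem.List.sorted spans (fun x => x.2.1 - x.1)
  let nodes : List Int := PySem.List.pyRange 0 (spans2.length : Int) 1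
  let adj : List (Int × Int) :=
    (PySem.List.enumerate spans2).foldl (fun adj p =>
      let l := p.2.1
      let r := p.2.2.1
      if r - l > 0 then
        (PySem.List.pyRange 0 p.1 1).reverse.foldl (fun adj k =>
          let sp := PySem.List.pyGetD spans2 k (0, 0, 0)
          if l ≤ sp.1 ∧ sp.2.1 ≤ r ∧
             ¬ ((PySem.List.pyRange (k + 1) p.1 1).any (fun j =>
                let sq := PySem.List.pyGetD spans2 j (0, 0, 0)
                decide (l ≤ sq.1) && decide (sq.1 ≤ sp.1) &&
                  decide (sp.2.1 ≤ sq.2.1) && decide (sq.2.1 ≤ r)) = true)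
          then adj ++ [(p.1, k)] else adj) adj
      else adj) []
  (nodes, adj)

-- ===== PRECONDITION & SPEC =====
def Spec_extract_dag (spans : List (Int × Int × Int)) (length : Int) (out : List Int × (List (Int × Int))) : Prop := out = extract_dag_alt spans length
instance (spans : List (Int × Int × Int)) (length : Int) (out : List Int × (List (Int × Int))) : Decidable (Spec_extract_dag spans length out) := by unfold Spec_extract_dag; infer_instance

-- ===== CLAIM (what is proved, stated in full; the proofs are below) =====
def Claim_equal_extract_dag : Prop := ∀ (spans : List (Int × Int × Int)) (length : Int), Dom_extract_dag spans length → Spec_extract_dag spans length (extract_dag spans length)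

-- ===== LEMMAS AND PROOFS =====

-- span s[k] (with Python-default), candidacy and containment tests shared by the proofs
def pvSp (s : List (Int × Int × Int)) (k : Int) : Int × Int × Int := PySem.List.pyGetD s k (0, 0, 0)

def pvCandB (s : List (Int × Int × Int)) (l r k : Int) : Bool :=
  decide (l ≤ (pvSp s k).1) && decide ((pvSp s k).2.1 ≤ r)

def pvContB (s : List (Int × Int × Int)) (j k : Int) : Bool :=
  decide ((pvSp s j).1 ≤ (pvSp s k).1) && decide ((pvSp s k).2.1 ≤ (pvSp s j).2.1)

-- the accepted indices of A's inner loop, top-down: after d steps (indices i-1 … i-d)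
def pvAccD (s : List (Int × Int × Int)) (l r i : Int) : Nat → List Int
  | 0 => []
  | d + 1 =>
      let prev := pvAccD s l r i d
      let m := i - 1 - (d : Int)
      if pvCandB s l r m && !(prev.any (fun j => pvContB s j m)) then prev ++ [m] else prev

-- B's stateless acceptance condition
def pvCondBB (s : List (Int × Int × Int)) (l r i k : Int) : Bool :=
  pvCandB s l r k &&
    !((PySem.List.pyRange (k + 1) i 1).any (fun j => pvCandB s l r j && pvContB s j k))

-- the descending index list [i-1, i-2, …, i-d]
def pvDescL (i : Int) (d : Nat) : List Int := (List.range d).map (fun t : Nat => i - 1 - (t : Int))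

theorem pvDescL_succ (i : Int) (d : Nat) :
    pvDescL i (d + 1) = pvDescL i d ++ [i - 1 - (d : Int)] := by
  simp [pvDescL, List.range_succ]

theorem pvMem_descL (i : Int) (d : Nat) (j : Int) :
    j ∈ pvDescL i d ↔ i - d ≤ j ∧ j < i := by
  induction d with
  | zero =>
    constructor
    · intro h
      exact absurd h (by simp [pvDescL])
    · rintro ⟨h1, h2⟩
      exfalso
      push_cast at h1
      omega
  | succ d ih =>
    rw [pvDescL_succ]
    simp only [List.mem_append, List.mem_singleton, ih]
    constructor
    · rintro (⟨h1, h2⟩ | rfl) <;> (constructor <;> omega)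
    · rintro ⟨h1, h2⟩
      rcases eq_or_ne j (i - 1 - (d : Int)) with rfl | hne
      · right; rfl
      · left; omega

theorem pvRev_pyRange (i : Int) :
    (PySem.List.pyRange 0 i 1).reverse = pvDescL i i.toNat := by
  have h := PySem.List.pyRange_neg_one_eq_reverse (i - 1) (-1)
  norm_num at h
  rw [← h, PySem.List.pyRange_neg_one]
  have ht : (i - 1 - -1).toNat = i.toNat := by omega
  rw [ht, pvDescL]

-- transitivity of span containment
theorem pvContB_trans (s : List (Int × Int × Int)) (a b c : Int)
    (h1 : pvContB s a b = true) (h2 : pvContB s b c = true) : pvContB s a c = true := by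
  simp only [pvContB, Bool.and_eq_true, decide_eq_true_iff] at *
  omega

-- descent: a contained candidate is always contained in some B-accepted candidate above it
theorem pvDescent (s : List (Int × Int × Int)) (l r i m : Int) (d : Nat) (hm : m = i - 1 - (d : Int)) :
    ∀ (fuel : Nat) (j : Int), (i - j).toNat ≤ fuel → m < j → j < i →
      pvCandB s l r j = true → pvContB s j m = true →
      ∃ j' ∈ (pvDescL i d).filter (fun k => pvCondBB s l r i k), pvContB s j' m = true := by
  intro fuel
  induction fuel with
  | zero => intro j hf h1 h2 _ _; omega
  | succ fuel ih =>
    intro j hf h1 h2 hcand hcont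
    by_cases hc : pvCondBB s l r i j = true
    · exact ⟨j, List.mem_filter.2 ⟨(pvMem_descL i d j).2 ⟨by omega, h2⟩, hc⟩, hcont⟩
    · have hany : (PySem.List.pyRange (j + 1) i 1).any
          (fun j2 => pvCandB s l r j2 && pvContB s j2 j) = true := by
        simp only [pvCondBB, Bool.and_eq_true, Bool.not_eq_true'] at hc
        rcases Bool.eq_false_or_eq_true ((PySem.List.pyRange (j + 1) i 1).any
          (fun j2 => pvCandB s l r j2 && pvContB s j2 j)) with h | h
        · exact h
        · exact absurd ⟨hcand, h⟩ hc
      obtain ⟨j2, hj2mem, hj2⟩ := List.any_eq_true.1 hany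
      rw [PySem.List.mem_pyRange_one] at hj2mem
      rw [Bool.and_eq_true] at hj2
      exact ih j2 (by omega) (by omega) (by omega)
        hj2.1 (pvContB_trans s j2 j m hj2.2 hcont)

-- A's accepted set = B's filter
theorem pvAcc_eq_filter (s : List (Int × Int × Int)) (l r i : Int) :
    ∀ d : Nat, pvAccD s l r i d = (pvDescL i d).filter (fun k => pvCondBB s l r i k) := by
  intro d
  induction d with
  | zero => rfl
  | succ d ih =>
    have hiff : ((pvDescL i d).filter (fun k => pvCondBB s l r i k)).any
          (fun j => pvContB s j (i - 1 - (d : Int)))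
        = (PySem.List.pyRange ((i - 1 - (d : Int)) + 1) i 1).any
          (fun j => pvCandB s l r j && pvContB s j (i - 1 - (d : Int))) := by
      rw [Bool.eq_iff_iff]
      simp only [List.any_eq_true]
      constructor
      · rintro ⟨j, hjf, hcont⟩
        obtain ⟨hjd, hcb⟩ := List.mem_filter.1 hjf
        obtain ⟨hj1, hj2⟩ := (pvMem_descL i d j).1 hjd
        refine ⟨j, PySem.List.mem_pyRange_one.2 ⟨by omega, hj2⟩, ?_⟩
        rw [Bool.and_eq_true]
        rw [pvCondBB, Bool.and_eq_true] at hcb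
        exact ⟨hcb.1, hcont⟩
      · rintro ⟨j, hjm, hj⟩
        rw [PySem.List.mem_pyRange_one] at hjm
        rw [Bool.and_eq_true] at hj
        exact pvDescent s l r i (i - 1 - (d : Int)) d rfl (i - j).toNat j le_rfl
          (by omega) hjm.2 hj.1 hj.2
    rw [pvAccD, pvDescL_succ, List.filter_append, ih, hiff, ← pvCondBB]
    by_cases hcb : pvCondBB s l r i (i - 1 - (d : Int)) = true
    · rw [if_pos hcb, List.filter_cons, List.filter_nil, if_pos hcb]
    · rw [if_neg hcb, List.filter_cons, List.filter_nil, if_neg hcb, List.append_nil]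

theorem pvMem_accD (s : List (Int × Int × Int)) (l r i : Int) (d : Nat) (j : Int)
    (h : j ∈ pvAccD s l r i d) : i - d ≤ j ∧ j < i := by
  rw [pvAcc_eq_filter] at h
  exact (pvMem_descL i d j).1 (List.mem_filter.1 h).1

-- the step condition of A's inner loop, against an accepted-pairs list
theorem pvCondA_iff (s : List (Int × Int × Int)) (l r m : Int) (xs : List Int) :
    ((pvSp s m).1 ≥ l ∧ (pvSp s m).2.1 ≤ r ∧
      ¬ covered (pvSp s m).1 (pvSp s m).2.1
          (xs.map (fun k => ((pvSp s k).1, (pvSp s k).2.1))) = true)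
    ↔ (pvCandB s l r m && !(xs.any (fun j => pvContB s j m))) = true := by
  simp only [covered, pvCandB, pvContB, List.any_map, Function.comp_def, Bool.and_eq_true,
    Bool.not_eq_true', List.any_eq_true, List.any_eq_false, decide_eq_true_iff, ge_iff_le,
    not_exists]
  constructor
  · rintro ⟨h1, h2, h3⟩
    exact ⟨⟨h1, h2⟩, fun x hx hc => h3 x ⟨hx, hc⟩⟩
  · rintro ⟨⟨h1, h2⟩, h3⟩
    exact ⟨h1, h2, fun x hx => h3 x hx.1 hx.2⟩

-- characterization of A's inner fold
theorem pvInnerA (s : List (Int × Int × Int)) (l r : Int) (i : Int) (node : Int)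
    (nodes : List Int) (adj : List (Int × Int)) :
    ∀ d : Nat,
    (pvDescL i d).foldl
      (fun (st : List (Int × Int) × List (Int × Int)) k =>
        let sp := PySem.List.pyGetD s k (0, 0, 0)
        if sp.1 ≥ l ∧ sp.2.1 ≤ r ∧ ¬ covered sp.1 sp.2.1 st.2 = true then
          (st.1 ++ [(node, PySem.List.pyGetD nodes k 0)], st.2 ++ [(sp.1, sp.2.1)])
        else st) (adj, ([] : List (Int × Int)))
    = (adj ++ (pvAccD s l r i d).map (fun k => (node, PySem.List.pyGetD nodes k 0)),
       (pvAccD s l r i d).map (fun k => ((pvSp s k).1, (pvSp s k).2.1))) := by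
  intro d
  induction d with
  | zero => simp [pvDescL, pvAccD]
  | succ d ih =>
    rw [pvDescL_succ, List.foldl_append, ih]
    simp only [List.foldl_cons, List.foldl_nil]
    simp only [show ∀ k : Int, PySem.List.pyGetD s k (0, 0, 0) = pvSp s k from fun _ => rfl]
    rw [pvAccD]
    by_cases h : (pvCandB s l r (i - 1 - (d : Int)) &&
        !((pvAccD s l r i d).any (fun j => pvContB s j (i - 1 - (d : Int))))) = true
    · rw [if_pos h, if_pos ((pvCondA_iff s l r (i - 1 - (d : Int)) (pvAccD s l r i d)).2 h)]
      simp [pvSp]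
    · rw [if_neg h, if_neg (fun hp => h ((pvCondA_iff s l r (i - 1 - (d : Int)) (pvAccD s l r i d)).1 hp))]

theorem pvZip_range (xs : List (Int × Int × Int)) :
    ∀ a : Int, ((PySem.List.pyRange a (a + xs.length) 1).zip xs) = PySem.List.enumerate xs a := by
  induction xs with
  | nil => intro a; simp [PySem.List.enumerate]
  | cons x xs ih =>
    intro a
    have hb : a + ((x :: xs).length : Int) = (a + 1) + xs.length := by
      push_cast [List.length_cons]; ring
    rw [hb, PySem.List.pyRange_one_cons (by omega), List.zip_cons_cons,
      PySem.List.enumerate_cons, ih (a + 1)]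

theorem pvEnum_enum (xs : List (Int × Int × Int)) :
    ∀ a : Int, PySem.List.enumerate (PySem.List.enumerate xs a) a
      = (PySem.List.enumerate xs a).map (fun p => (p.1, p)) := by
  induction xs with
  | nil => intro a; rfl
  | cons x xs ih =>
    intro a
    rw [PySem.List.enumerate_cons, PySem.List.enumerate_cons, ih (a + 1), List.map_cons]

-- B's step condition, against B's literal any-test
theorem pvCondB_iff (s : List (Int × Int × Int)) (l r i k : Int) :
    (l ≤ (pvSp s k).1 ∧ (pvSp s k).2.1 ≤ r ∧
      ¬ ((PySem.List.pyRange (k + 1) i 1).any (fun j =>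
          decide (l ≤ (pvSp s j).1) && decide ((pvSp s j).1 ≤ (pvSp s k).1) &&
            decide ((pvSp s k).2.1 ≤ (pvSp s j).2.1) && decide ((pvSp s j).2.1 ≤ r)) = true))
    ↔ pvCondBB s l r i k = true := by
  simp only [pvCondBB, pvCandB, pvContB, Bool.and_eq_true, Bool.not_eq_true',
    List.any_eq_true, List.any_eq_false, decide_eq_true_iff, not_exists]
  constructor
  · rintro ⟨h1, h2, h3⟩
    refine ⟨⟨h1, h2⟩, fun x hx hc => h3 x ⟨hx, ?_⟩⟩
    obtain ⟨⟨ha, hb⟩, hc2, hd⟩ := hc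
    exact ⟨⟨⟨ha, hc2⟩, hd⟩, hb⟩
  · rintro ⟨⟨h1, h2⟩, h3⟩
    refine ⟨h1, h2, fun x hx => ?_⟩
    exact h3 x hx.1 ⟨⟨hx.2.1.1.1, hx.2.2⟩, hx.2.1.1.2, hx.2.1.2⟩

-- characterization of B's inner fold
theorem pvInnerB (s : List (Int × Int × Int)) (l r i iv : Int) (adj : List (Int × Int)) :
    ∀ d : Nat,
    (pvDescL i d).foldl (fun adj k =>
        let sp := PySem.List.pyGetD s k (0, 0, 0)
        if l ≤ sp.1 ∧ sp.2.1 ≤ r ∧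
           ¬ ((PySem.List.pyRange (k + 1) i 1).any (fun j =>
              let sq := PySem.List.pyGetD s j (0, 0, 0)
              decide (l ≤ sq.1) && decide (sq.1 ≤ sp.1) &&
                decide (sp.2.1 ≤ sq.2.1) && decide (sq.2.1 ≤ r)) = true)
        then adj ++ [(iv, k)] else adj) adj
    = adj ++ ((pvDescL i d).filter (fun k => pvCondBB s l r i k)).map (fun k => (iv, k)) := by
  intro d
  induction d with
  | zero => simp [pvDescL]
  | succ d ih =>
    rw [pvDescL_succ, List.foldl_append, ih]
    simp only [List.foldl_cons, List.foldl_nil, List.filter_append, List.filter_cons,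
      List.filter_nil]
    simp only [show ∀ k : Int, PySem.List.pyGetD s k (0, 0, 0) = pvSp s k from fun _ => rfl]
    by_cases hcb : pvCondBB s l r i (i - 1 - (d : Int)) = true
    · rw [if_pos ((pvCondB_iff s l r i (i - 1 - (d : Int))).2 hcb), if_pos hcb]
      simp
    · rw [if_neg (fun hp => hcb ((pvCondB_iff s l r i (i - 1 - (d : Int))).1 hp)), if_neg hcb]
      simp

-- nodes[k] = k
theorem pvNodes_get (n k : Int) (h0 : 0 ≤ k) (hn : k < n) :
    PySem.List.pyGetD (PySem.List.pyRange 0 n 1) k 0 = k := by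
  obtain ⟨k, rfl⟩ := Int.eq_ofNat_of_zero_le h0
  rw [PySem.List.pyGetD_natCast, PySem.List.pyRange_one,
    PySem.List.getD_map_range _ _ _ _ (by omega)]
  omega

-- ===== VERDICT (by name: the statement is the Claim_ definition above) =====
theorem extract_dag_spec : Claim_equal_extract_dag := by
  intro spans length _
  show extract_dag spans length = extract_dag_alt spans length
  unfold extract_dag extract_dag_alt
  dsimp only
  rw [show (spans.length : Int) = ((PySem.List.sorted spans (fun x => x.2.1 - x.1)).length : Int)
      by rw [PySem.List.length_sorted]]
  set s2 := PySem.List.sorted spans (fun x => x.2.1 - x.1) with hs2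
  congr 1
  have hz : (PySem.List.pyRange 0 (s2.length : Int) 1).zip s2 = PySem.List.enumerate s2 0 := by
    have h := pvZip_range s2 0
    rw [zero_add] at h
    exact h
  rw [hz, pvEnum_enum s2 0, List.foldl_map]
  apply PySem.List.foldl_congr_mem
  intro adj p hp
  obtain ⟨k0, hk0, rfl⟩ := (PySem.List.mem_enumerate_iff s2 0 p).1 hp
  dsimp only
  by_cases hr : s2[k0].2.1 - s2[k0].1 > 0
  · rw [if_pos hr, if_pos hr, pvRev_pyRange, pvInnerA, pvInnerB, ← pvAcc_eq_filter]
    dsimp only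
    congr 1
    apply List.map_congr_left
    intro j hj
    obtain ⟨hj1, hj2⟩ := pvMem_accD _ _ _ _ _ _ hj
    rw [pvNodes_get _ _ (by omega) (by omega)]
  · rw [if_neg hr, if_neg hr]
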